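-- pv_equiv track=rewrite | github.com/sandeepkumar8713/pythonapps | 27_seventhFolder/27_color_full_rope.py | find_min_time
-- ===== SOURCE A (Python) =====
-- def find_min_time(colors, neededTime):
--     total_time = 0
--     current_index = 0
--     for next_index in range(1, len(colors)):
--         if colors[current_index] == colors[next_index]:
--             if neededTime[current_index] <= neededTime[next_index]:
--                 # remove current_index
--                 total_time += neededTime[current_index]
--                 current_index = next_index
--             else:
--                 # remove next_index
--                 total_time += neededTime[next_index]
--         else:
--             # no removal required
--             current_index = next_index
--
--     return total_time
-- ===== SOURCE B (Python) =====
-- def find_min_time(colors, neededTime):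
--     total = 0
--     n = len(colors)
--     i = 0
--     while i < n:
--         j = i + 1
--         while j < n and colors[j] == colors[i]:
--             j += 1
--         if j - i > 1:
--             run = neededTime[i:j]
--             total += sum(run) - max(run)
--         i = j
--     return total
-- ===== Notes on version B (the rewrite author's own statement) =====
-- stated objective: alternative
-- what changed: B replaces A's single pass with a running current_index/pairwise comparison by an explicit two-level run scan: an inner loop finds each maximal same-color run, then the run contributes sum(run) - max(run).
import Mathlib
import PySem

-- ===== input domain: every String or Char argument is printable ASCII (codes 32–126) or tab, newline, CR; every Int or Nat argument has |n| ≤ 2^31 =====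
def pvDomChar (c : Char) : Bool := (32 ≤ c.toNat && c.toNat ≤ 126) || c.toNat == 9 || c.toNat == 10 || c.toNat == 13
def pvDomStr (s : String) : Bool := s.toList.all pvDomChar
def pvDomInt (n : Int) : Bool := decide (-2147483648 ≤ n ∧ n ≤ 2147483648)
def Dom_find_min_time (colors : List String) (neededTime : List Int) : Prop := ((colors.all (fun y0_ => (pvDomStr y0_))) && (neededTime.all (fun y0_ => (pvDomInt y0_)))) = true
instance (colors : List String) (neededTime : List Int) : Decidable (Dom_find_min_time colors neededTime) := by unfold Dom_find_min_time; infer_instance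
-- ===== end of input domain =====

-- B replaces A's running pairwise comparison by an explicit run scan (find each maximal
-- same-color run, add sum-of-run minus max-of-run); same O(n) cost, different decomposition.

-- ===== PORT A =====
-- loop body of A's 'for next_index in range(1, len(colors))', state = (total_time, current_index);
-- list indexing xs[i] is ported as getD (indices are Nats from range; Pre_find_min_time excludes
-- exactly the inputs where Python's neededTime[...] would raise IndexError)
def pvStepA (colors : List String) (neededTime : List Int) (st : Int × Nat) (next : Nat) : Int × Nat :=
  if colors.getD st.2 "" = colors.getD next "" then
    if neededTime.getD st.2 0 ≤ neededTime.getD next 0 then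
      (st.1 + neededTime.getD st.2 0, next)
    else
      (st.1 + neededTime.getD next 0, st.2)
  else (st.1, next)

def find_min_time (colors : List String) (neededTime : List Int) : Int :=
  ((List.range' 1 (colors.length - 1)).foldl (pvStepA colors neededTime) (0, 0)).1

-- ===== PORT B =====
-- inner 'while j < n and colors[j] == colors[i]' of Source B (c = colors[i])
def pvRunEnd (colors : List String) (c : String) (j : Nat) : Nat :=
  if h : j < colors.length ∧ colors.getD j "" = c then pvRunEnd colors c (j + 1) else j
termination_by colors.length - j
decreasing_by obtain ⟨h1, _⟩ := h; omega

-- needed by pvAltLoop's termination: the run end never moves left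
lemma pvRunEnd_ge (colors : List String) (c : String) (j : Nat) : j ≤ pvRunEnd colors c j := by
  fun_induction pvRunEnd colors c j with
  | case1 j h ih => omega
  | case2 j h => omega

-- 'if j - i > 1: total += sum(run) - max(run)' of Source B (run = neededTime[i:j]); max([]) would
-- raise in Python — that happens only outside Pre_find_min_time, where the port totalises it with .getD 0
def pvRunCost (neededTime : List Int) (i j : Nat) : Int :=
  if 1 < j - i then
    (PySem.List.slice neededTime (some (i : Int)) (some (j : Int))).sum
      - (PySem.List.max? (PySem.List.slice neededTime (some (i : Int)) (some (j : Int))) id).getD 0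
  else 0

-- outer 'while i < n' of Source B
def pvAltLoop (colors : List String) (neededTime : List Int) (i : Nat) : Int :=
  if _h : i < colors.length then
    pvRunCost neededTime i (pvRunEnd colors (colors.getD i "") (i + 1))
      + pvAltLoop colors neededTime (pvRunEnd colors (colors.getD i "") (i + 1))
  else 0
termination_by colors.length - i
decreasing_by have := pvRunEnd_ge colors (colors.getD i "") (i + 1); omega

def find_min_time_alt (colors : List String) (neededTime : List Int) : Int :=
  pvAltLoop colors neededTime 0

-- ===== PRECONDITION & SPEC =====
-- Pre_ excludes exactly the inputs on which A raises IndexError: an adjacent equal-color pair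
-- whose right index is past the end of neededTime.
def Pre_find_min_time (colors : List String) (neededTime : List Int) : Prop :=
  ∀ m, m < colors.length - 1 → colors.getD m "" = colors.getD (m + 1) "" →
    m + 1 < neededTime.length

instance (colors : List String) (neededTime : List Int) : Decidable (Pre_find_min_time colors neededTime) := by
  unfold Pre_find_min_time; infer_instance

def pvWitness_find_min_time : List String × List Int := (["a", "a", "b"], [2, 1, 3])

def Spec_find_min_time (colors : List String) (neededTime : List Int) (out : Int) : Prop := out = find_min_time_alt colors neededTime
instance (colors : List String) (neededTime : List Int) (out : Int) : Decidable (Spec_find_min_time colors neededTime out) := by unfold Spec_find_min_time; infer_instance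

-- ===== CLAIM (what is proved, stated in full; the proofs are below) =====
def Claim_equal_find_min_time : Prop := ∀ (colors : List String) (neededTime : List Int), Dom_find_min_time colors neededTime → Pre_find_min_time colors neededTime → Spec_find_min_time colors neededTime (find_min_time colors neededTime)

-- ===== LEMMAS AND PROOFS =====

lemma pvRunEnd_le (colors : List String) (c : String) (j : Nat) (h : j ≤ colors.length) :
    pvRunEnd colors c j ≤ colors.length := by
  fun_induction pvRunEnd colors c j with
  | case1 j h ih => exact ih (by omega)
  | case2 j h' => exact h

lemma pvRunEnd_mem (colors : List String) (c : String) (j : Nat) :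
    ∀ m, j ≤ m → m < pvRunEnd colors c j → colors.getD m "" = c := by
  fun_induction pvRunEnd colors c j with
  | case1 j h ih =>
    intro m hm1 hm2
    rcases Nat.eq_or_lt_of_le hm1 with rfl | hlt
    · exact h.2
    · exact ih m hlt hm2
  | case2 j h => intro m hm1 hm2; omega

lemma pvRunEnd_stop (colors : List String) (c : String) (j : Nat)
    (h : pvRunEnd colors c j < colors.length) :
    colors.getD (pvRunEnd colors c j) "" ≠ c := by
  fun_induction pvRunEnd colors c j with
  | case1 j h' ih => exact ih h
  | case2 j h' =>
    intro hc
    exact h' ⟨h, hc⟩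

-- Python's max(run) on a nonempty Int list is the foldl of Int.max over its tail
lemma max?_cons_int : ∀ (xs : List Int) (x : Int),
    PySem.List.max? (x :: xs) id = some (xs.foldl max x) := by
  intro xs
  induction xs with
  | nil => intro x; rfl
  | cons y ys ih =>
    intro x
    have h1 : PySem.List.max? (x :: y :: ys) id = PySem.List.max? (max x y :: ys) id := by
      unfold PySem.List.max?
      simp only [List.foldl_cons, id_eq]
      congr 1
      rcases lt_or_ge x y with h | h
      · rw [if_pos h, max_eq_right h.le]
      · rw [if_neg (not_lt.2 h), max_eq_left h]
    rw [h1, ih (max x y)]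
    simp [List.foldl_cons]

lemma dropTake_eq_map_range' : ∀ (xs : List Int) (a d : Nat), a + d ≤ xs.length →
    List.take d (List.drop a xs) = (List.range' a d).map (fun m => xs.getD m 0) := by
  intro xs a d h
  apply List.ext_getElem
  · simp; omega
  · intro n h1 h2
    simp only [List.getElem_take, List.getElem_drop, List.getElem_map, List.getElem_range']
    rw [List.getD_eq_getElem _ _ (by simp at h1; omega)]
    simp

-- within one same-color run, A's fold adds (sum of run values seen) minus (their running max),
-- and current_index stays inside the run
lemma foldl_run (colors : List String) (nt : List Int) :
    ∀ (d k cur : Nat) (total : Int),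
      (∀ m, k ≤ m → m < k + d → colors.getD m "" = colors.getD cur "") →
      ∃ cur', colors.getD cur' "" = colors.getD cur "" ∧
        (List.range' k d).foldl (pvStepA colors nt) (total, cur)
          = (total + nt.getD cur 0
               + ((List.range' k d).map (fun m => nt.getD m 0)).sum
               - (List.range' k d).foldl (fun a m => max a (nt.getD m 0)) (nt.getD cur 0),
             cur') := by
  intro d
  induction d with
  | zero =>
    intro k cur total _
    exact ⟨cur, rfl, by simp⟩
  | succ d ih =>
    intro k cur total hcol
    have hk : colors.getD k "" = colors.getD cur "" := hcol k le_rfl (by omega)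
    rw [List.range'_succ]
    simp only [List.foldl_cons, List.map_cons, List.sum_cons]
    rcases le_or_gt (nt.getD cur 0) (nt.getD k 0) with hle | hlt
    · have hstep : pvStepA colors nt (total, cur) k = (total + nt.getD cur 0, k) := by
        unfold pvStepA; rw [if_pos hk.symm, if_pos hle]
      rw [hstep]
      obtain ⟨cur', hc', heq⟩ := ih (k + 1) k (total + nt.getD cur 0)
        (fun m hm1 hm2 => (hcol m (by omega) (by omega)).trans hk.symm)
      refine ⟨cur', hc'.trans hk, ?_⟩
      rw [heq, max_eq_right hle]
      simp only [Prod.mk.injEq]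
      exact ⟨by ring, trivial⟩
    · have hstep : pvStepA colors nt (total, cur) k = (total + nt.getD k 0, cur) := by
        unfold pvStepA; rw [if_pos hk.symm, if_neg (not_le.2 hlt)]
      rw [hstep]
      obtain ⟨cur', hc', heq⟩ := ih (k + 1) cur (total + nt.getD k 0)
        (fun m hm1 hm2 => hcol m (by omega) (by omega))
      refine ⟨cur', hc', ?_⟩
      rw [heq, max_eq_left hlt.le]
      simp only [Prod.mk.injEq]
      exact ⟨by ring, trivial⟩

-- B's per-run contribution equals A's sum-minus-running-max over that run
lemma contrib_eq (colors : List String) (nt : List Int) (hpre : Pre_find_min_time colors nt)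
    (i j : Nat) (hij : i + 1 ≤ j) (hjn : j ≤ colors.length)
    (hrun : ∀ m, i + 1 ≤ m → m < j → colors.getD m "" = colors.getD i "") :
    pvRunCost nt i j
    = nt.getD i 0 + ((List.range' (i + 1) (j - (i + 1))).map (fun m => nt.getD m 0)).sum
        - (List.range' (i + 1) (j - (i + 1))).foldl (fun a m => max a (nt.getD m 0)) (nt.getD i 0) := by
  unfold pvRunCost
  by_cases hlen : 1 < j - i
  · have hall : ∀ m, i + 1 ≤ m → m < j → m < nt.length := by
      intro m hm1 hm2
      have hpair : colors.getD (m - 1) "" = colors.getD m "" := by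
        rcases Nat.eq_or_lt_of_le hm1 with h | h
        · have : m - 1 = i := by omega
          rw [this]
          exact (hrun m hm1 hm2).symm
        · exact (hrun (m - 1) (by omega) (by omega)).trans (hrun m hm1 hm2).symm
      have h2 := hpre (m - 1) (by omega) (by
        have : m - 1 + 1 = m := by omega
        rw [this]; exact hpair)
      omega
    have hjlen : j ≤ nt.length := by
      have := hall (j - 1) (by omega) (by omega); omega
    rw [if_pos hlen, PySem.List.slice_natCast, dropTake_eq_map_range' nt i (j - i) (by omega)]
    have hsplit : List.range' i (j - i) = i :: List.range' (i + 1) (j - (i + 1)) := by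
      have h3 : j - i = (j - (i + 1)) + 1 := by omega
      rw [h3, List.range'_succ]
    rw [hsplit]
    simp only [List.map_cons, List.sum_cons]
    rw [max?_cons_int, Option.getD_some, List.foldl_map]
  · have hj1 : j = i + 1 := by omega
    rw [if_neg hlen]
    subst hj1
    simp

lemma foldl_main (colors : List String) (nt : List Int) (hpre : Pre_find_min_time colors nt) :
    ∀ (fuel i : Nat) (total : Int), i < colors.length → colors.length - i ≤ fuel →
      ((List.range' (i + 1) (colors.length - (i + 1))).foldl (pvStepA colors nt) (total, i)).1
        = total + pvAltLoop colors nt i := by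
  intro fuel
  induction fuel with
  | zero => intro i total h1 h2; omega
  | succ fuel ih =>
    intro i total hi hfl
    have hij : i + 1 ≤ pvRunEnd colors (colors.getD i "") (i + 1) :=
      pvRunEnd_ge colors (colors.getD i "") (i + 1)
    have hjn : pvRunEnd colors (colors.getD i "") (i + 1) ≤ colors.length :=
      pvRunEnd_le colors (colors.getD i "") (i + 1) (by omega)
    set j := pvRunEnd colors (colors.getD i "") (i + 1) with hjdef
    have hrun : ∀ m, i + 1 ≤ m → m < j → colors.getD m "" = colors.getD i "" :=
      pvRunEnd_mem colors (colors.getD i "") (i + 1)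
    rw [pvAltLoop, dif_pos hi]
    simp only [← hjdef]
    have hsum : colors.length - (i + 1) = (j - (i + 1)) + (colors.length - j) := by omega
    have hjj : i + 1 + (j - (i + 1)) = j := by omega
    rw [hsum, ← List.range'_append_1, hjj, List.foldl_append]
    obtain ⟨cur', hc', heq⟩ := foldl_run colors nt (j - (i + 1)) (i + 1) i total
      (fun m h1 h2 => hrun m h1 (by omega))
    rw [heq]
    have hcon := contrib_eq colors nt hpre i j hij hjn hrun
    rcases Nat.eq_or_lt_of_le hjn with hn | hjlt
    · rw [hn]
      simp only [Nat.sub_self, List.range'_zero, List.foldl_nil]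
      rw [← hn, pvAltLoop, dif_neg (by omega), hcon]
      ring
    · have hsplit : colors.length - j = (colors.length - (j + 1)) + 1 := by omega
      rw [hsplit, List.range'_succ, List.foldl_cons]
      have hstop := pvRunEnd_stop colors (colors.getD i "") (i + 1) (by rw [← hjdef]; omega)
      rw [← hjdef] at hstop
      have hstep : pvStepA colors nt
          (total + nt.getD i 0
             + ((List.range' (i + 1) (j - (i + 1))).map (fun m => nt.getD m 0)).sum
             - (List.range' (i + 1) (j - (i + 1))).foldl (fun a m => max a (nt.getD m 0)) (nt.getD i 0),
           cur') j
          = (total + nt.getD i 0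
             + ((List.range' (i + 1) (j - (i + 1))).map (fun m => nt.getD m 0)).sum
             - (List.range' (i + 1) (j - (i + 1))).foldl (fun a m => max a (nt.getD m 0)) (nt.getD i 0),
           j) := by
        unfold pvStepA
        rw [if_neg (fun h => hstop (h.symm.trans hc'))]
      rw [hstep, ih j _ hjlt (by omega), hcon]
      ring

-- ===== VERDICT (by name: the statement is the Claim_ definition above) =====
theorem find_min_time_spec : Claim_equal_find_min_time := by
  intro colors nt _ hpre
  unfold Spec_find_min_time find_min_time find_min_time_alt
  rcases Nat.eq_zero_or_pos colors.length with hz | hpos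
  · rw [pvAltLoop]
    simp [hz]
  · have := foldl_main colors nt hpre colors.length 0 0 hpos (by omega)
    simpa using this
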